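-- pv_equiv track=rewrite | github.com/Bobsans/keygen | keygen/utils.py | build_charset
-- ===== SOURCE A (Python) =====
-- import string
--
-- SAFE_EXCLUDE = set(";\"'\\`$")
--
-- def build_charset(signature: str, safe: bool = True) -> str:
--     charset = ''
--     if 'u' in signature:
--         charset += string.ascii_uppercase
--     if 'l' in signature:
--         charset += string.ascii_lowercase
--     if 'd' in signature:
--         charset += string.digits
--     if 'p' in signature:
--         charset += string.punctuation
--     if 'h' in signature:
--         charset += string.hexdigits
--     if 'o' in signature:
--         charset += string.octdigits
--     if 'b' in signature:
--         charset += '01'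
--
--     if safe:
--         charset = ''.join([c for c in charset if c not in SAFE_EXCLUDE])
--
--     return ''.join(sorted(set(charset)))
-- ===== SOURCE B (Python) =====
-- SAFE_EXCLUDE = ";\"'\\`$"
--
--
-- def _wanted(c: str, signature: str) -> bool:
--     # membership test: does printable character c belong to any selected class?
--     if 'A' <= c <= 'Z':
--         return 'u' in signature or ('h' in signature and c <= 'F')
--     if 'a' <= c <= 'z':
--         return 'l' in signature or ('h' in signature and c <= 'f')
--     if '0' <= c <= '9':
--         return ('d' in signature or 'h' in signature
--                 or ('o' in signature and c <= '7')
--                 or ('b' in signature and c <= '1'))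
--     return 'p' in signature  # remaining printable non-space chars are punctuation
--
--
-- def build_charset(signature: str, safe: bool = True) -> str:
--     # scan printable ASCII in ascending order: output is sorted and duplicate-free by construction
--     out = []
--     for code in range(33, 127):
--         c = chr(code)
--         if safe and c in SAFE_EXCLUDE:
--             continue
--         if _wanted(c, signature):
--             out.append(c)
--     return ''.join(out)
-- ===== Notes on version B (the rewrite author's own statement) =====
-- stated objective: alternative
-- what changed: Instead of concatenating the selected character classes and then deduplicating and sorting, B makes one ascending scan over the printable ASCII codes 33..126 and emits each character iff a per-character range predicate says it belongs to a selected class (and is not excluded when safe), so the output is sorted and duplicate-free by construction with no set and no sort.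
import Mathlib
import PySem

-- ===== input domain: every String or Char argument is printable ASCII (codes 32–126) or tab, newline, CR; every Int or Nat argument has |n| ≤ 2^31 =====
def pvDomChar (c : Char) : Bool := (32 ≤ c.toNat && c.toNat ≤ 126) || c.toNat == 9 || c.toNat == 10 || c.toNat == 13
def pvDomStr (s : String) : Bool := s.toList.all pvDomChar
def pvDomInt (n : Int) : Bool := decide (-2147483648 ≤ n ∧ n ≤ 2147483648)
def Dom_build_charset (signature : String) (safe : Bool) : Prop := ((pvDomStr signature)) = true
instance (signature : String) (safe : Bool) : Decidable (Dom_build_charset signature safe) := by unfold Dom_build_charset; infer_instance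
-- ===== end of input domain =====

-- B replaces A's concatenate-classes / dedup / sort pipeline by ONE ascending scan over the
-- printable ASCII codes with a per-character membership predicate: the output is sorted and
-- duplicate-free by construction, so no set and no sort are needed (objective: alternative).

-- ===== PORT A =====
def pvAsciiUppercase : List Char := "ABCDEFGHIJKLMNOPQRSTUVWXYZ".toList
def pvAsciiLowercase : List Char := "abcdefghijklmnopqrstuvwxyz".toList
def pvDigits : List Char := "0123456789".toList
def pvPunctuation : List Char := "!\"#$%&'()*+,-./:;<=>?@[\\]^_`{|}~".toList
def pvHexdigits : List Char := "0123456789abcdefABCDEF".toList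
def pvOctdigits : List Char := "01234567".toList
-- SAFE_EXCLUDE = set(";\"'\\`$")
def pvSafeExclude : PySem.Set Char := PySem.Set.ofList ";\"'\\`$".toList

-- the seven `charset += …` branches in A's order; ''.join(sorted(set(charset))) is exactly
-- String.mk of the sorted deduplicated char list (it joins the one-char strings of those chars)
def build_charset (signature : String) (safe : Bool) : String :=
  let charset : List Char :=
    ((if PySem.Str.isIn "u" signature then pvAsciiUppercase else []) ++
     (if PySem.Str.isIn "l" signature then pvAsciiLowercase else []) ++
     (if PySem.Str.isIn "d" signature then pvDigits else []) ++
     (if PySem.Str.isIn "p" signature then pvPunctuation else []) ++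
     (if PySem.Str.isIn "h" signature then pvHexdigits else []) ++
     (if PySem.Str.isIn "o" signature then pvOctdigits else []) ++
     (if PySem.Str.isIn "b" signature then ['0', '1'] else []))
  let charset := if safe then charset.filter (fun c => !(PySem.Set.contains pvSafeExclude c)) else charset
  String.mk (PySem.List.sorted (PySem.Set.ofList charset) (fun x => x) false)

-- ===== PORT B =====
-- _wanted(c, signature): same branch order as Source B; 'x in signature' = PySem.Str.isIn
def pvWanted (c : Char) (signature : String) : Bool :=
  if 'A' ≤ c && c ≤ 'Z' then
    PySem.Str.isIn "u" signature || (PySem.Str.isIn "h" signature && c ≤ 'F')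
  else if 'a' ≤ c && c ≤ 'z' then
    PySem.Str.isIn "l" signature || (PySem.Str.isIn "h" signature && c ≤ 'f')
  else if '0' ≤ c && c ≤ '9' then
    PySem.Str.isIn "d" signature || PySem.Str.isIn "h" signature ||
    (PySem.Str.isIn "o" signature && c ≤ '7') ||
    (PySem.Str.isIn "b" signature && c ≤ '1')
  else
    PySem.Str.isIn "p" signature

-- for code in range(33, 127): the continue/append loop, as a foldl over PySem.List.pyRange;
-- `c in SAFE_EXCLUDE` (a single char in a string) is exactly list membership of its chars
def build_charset_alt (signature : String) (safe : Bool) : String :=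
  String.mk ((PySem.List.pyRange 33 127 1).foldl (fun acc code =>
    let c := Char.ofNat code.toNat
    if safe && (";\"'\\`$".toList.contains c) then acc
    else if pvWanted c signature then acc ++ [c] else acc) [])

-- ===== PRECONDITION & SPEC =====
def Spec_build_charset (signature : String) (safe : Bool) (out : String) : Prop := out = build_charset_alt signature safe
instance (signature : String) (safe : Bool) (out : String) : Decidable (Spec_build_charset signature safe out) := by unfold Spec_build_charset; infer_instance

-- ===== CLAIM (what is proved, stated in full; the proofs are below) =====
def Claim_equal_build_charset : Prop := ∀ (signature : String) (safe : Bool), Dom_build_charset signature safe → Spec_build_charset signature safe (build_charset signature safe)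

-- ===== LEMMAS AND PROOFS =====

-- both programs depend on `signature` only through the seven flag-membership booleans;
-- pvA/pvB are the two bodies with those booleans abstracted (build_charset sig safe
-- reduces to pvA (isIn "u" sig) … by beta, and likewise for the alt port)
def pvA (u l d p h o b safe : Bool) : String :=
  let charset : List Char :=
    ((if u then pvAsciiUppercase else []) ++
     (if l then pvAsciiLowercase else []) ++
     (if d then pvDigits else []) ++
     (if p then pvPunctuation else []) ++
     (if h then pvHexdigits else []) ++
     (if o then pvOctdigits else []) ++
     (if b then ['0', '1'] else []))
  let charset := if safe then charset.filter (fun c => !(PySem.Set.contains pvSafeExclude c)) else charset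
  String.mk (PySem.List.sorted (PySem.Set.ofList charset) (fun x => x) false)

def pvWantedB (c : Char) (u l d p h o b : Bool) : Bool :=
  if 'A' ≤ c && c ≤ 'Z' then u || (h && c ≤ 'F')
  else if 'a' ≤ c && c ≤ 'z' then l || (h && c ≤ 'f')
  else if '0' ≤ c && c ≤ '9' then d || h || (o && c ≤ '7') || (b && c ≤ '1')
  else p

def pvB (u l d p h o b safe : Bool) : String :=
  String.mk ((PySem.List.pyRange 33 127 1).foldl (fun acc code =>
    let c := Char.ofNat code.toNat
    if safe && (";\"'\\`$".toList.contains c) then acc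
    else if pvWantedB c u l d p h o b then acc ++ [c] else acc) [])

theorem pvA_eq (signature : String) (safe : Bool) :
    build_charset signature safe =
      pvA (PySem.Str.isIn "u" signature) (PySem.Str.isIn "l" signature)
        (PySem.Str.isIn "d" signature) (PySem.Str.isIn "p" signature)
        (PySem.Str.isIn "h" signature) (PySem.Str.isIn "o" signature)
        (PySem.Str.isIn "b" signature) safe := rfl

theorem pvB_eq (signature : String) (safe : Bool) :
    build_charset_alt signature safe =
      pvB (PySem.Str.isIn "u" signature) (PySem.Str.isIn "l" signature)
        (PySem.Str.isIn "d" signature) (PySem.Str.isIn "p" signature)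
        (PySem.Str.isIn "h" signature) (PySem.Str.isIn "o" signature)
        (PySem.Str.isIn "b" signature) safe := rfl

set_option maxRecDepth 100000 in
set_option maxHeartbeats 2000000 in
theorem pvAB (u l d p h o b safe : Bool) : pvA u l d p h o b safe = pvB u l d p h o b safe := by
  revert u l d p h o b safe; decide

-- ===== VERDICT (by name: the statement is the Claim_ definition above) =====
theorem build_charset_spec : Claim_equal_build_charset := by
  intro signature safe _
  unfold Spec_build_charset
  rw [pvA_eq, pvB_eq, pvAB]
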